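-- pv_equiv track=rewrite | github.com/GitMonsters/octotetrahedral-agi | arc-puzzle-catalog/re-arc/solves/1cbb7bb8/solver.py | find_anchor_color
-- ===== SOURCE A (Python) =====
-- from collections import Counter
--
-- def is_rectangle(cells):
--     if not cells:
--         return False
--     rs = [r for r, c in cells]
--     cs = [c for r, c in cells]
--     return len(cells) == (max(rs) - min(rs) + 1) * (max(cs) - min(cs) + 1)
--
-- def find_anchor_color(comps):
--     candidates = Counter()
--     total_2color = 0
--     for comp in comps:
--         colors = {}
--         for (r, c), v in comp.items():
--             colors.setdefault(v, []).append((r, c))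
--         if len(colors) != 2:
--             continue
--         total_2color += 1
--         for color, cells in colors.items():
--             if is_rectangle(cells):
--                 candidates[color] += 1
--     for color, count in candidates.most_common():
--         if count == total_2color:
--             return color
--     return candidates.most_common(1)[0][0] if candidates else None
-- ===== SOURCE B (Python) =====
-- def _matches_box(cells, r0, r1, c0, c1):
--     # cells must be exactly the row-major enumeration of the box; stops at the
--     # first mismatch, so at most len(cells) + 1 comparisons are ever made
--     it = iter(cells)
--     for r in range(r0, r1 + 1):
--         for c in range(c0, c1 + 1):
--             if next(it, None) != (r, c):
--                 return False
--     return next(it, None) is None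
--
--
-- def find_anchor_color(comps):
--     votes = []
--     for comp in comps:
--         order = list(dict.fromkeys(comp.values()))
--         if len(order) != 2:
--             continue
--         for v in order:
--             cells = sorted(p for p, w in comp.items() if w == v)
--             rs = [r for r, _ in cells]
--             cs = [c for _, c in cells]
--             if _matches_box(cells, min(rs), max(rs), min(cs), max(cs)):
--                 votes.append(v)
--     return max(dict.fromkeys(votes), key=votes.count) if votes else None
-- ===== Notes on version B (the rewrite author's own statement) =====
-- stated objective: alternative
-- what changed: B tests rectangularity by walking the row-major bounding-box enumeration against the lexicographically sorted cell list, stopping at the first mismatch (instead of A's cell-count-vs-area arithmetic on grouped cell lists), streams passing colors into a flat vote list, and returns the first-seen most frequent vote via max over dict.fromkeys with key votes.count, replacing A's Counter plus two most_common scans (equivalent since no color's count can exceed total_2color).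
import Mathlib
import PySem

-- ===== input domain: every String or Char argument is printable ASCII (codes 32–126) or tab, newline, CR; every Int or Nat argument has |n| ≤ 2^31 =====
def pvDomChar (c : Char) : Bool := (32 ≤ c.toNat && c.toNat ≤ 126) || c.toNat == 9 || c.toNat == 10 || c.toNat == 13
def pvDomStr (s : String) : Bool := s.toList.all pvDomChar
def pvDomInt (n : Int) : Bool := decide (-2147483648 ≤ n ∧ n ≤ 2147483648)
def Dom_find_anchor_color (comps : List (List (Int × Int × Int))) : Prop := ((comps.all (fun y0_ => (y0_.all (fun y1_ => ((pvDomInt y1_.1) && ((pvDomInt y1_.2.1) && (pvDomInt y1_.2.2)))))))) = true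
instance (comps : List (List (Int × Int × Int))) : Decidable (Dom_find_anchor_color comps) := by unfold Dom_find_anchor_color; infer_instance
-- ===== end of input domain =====

-- B replaces A's count-vs-bounding-box-area rectangle test by walking the row-major
-- bounding-box enumeration against the sorted cell list (stopping at the first mismatch), and
-- replaces A's Counter + most_common scans by a flat vote list consumed with one first-max
-- lookup (alternative algorithm, same cost).
-- Each comp is a Python dict {(r,c): v}, modelled as its item list (r, c, v) in insertion order.

-- ===== PORT A =====
-- Python max()/min() of an int list; both call sites are guarded by nonemptiness,
-- so the .getD 0 default is never reached.
def pyMaxInt (xs : List Int) : Int := (PySem.List.max? xs (fun x => x)).getD 0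
def pyMinInt (xs : List Int) : Int := (PySem.List.min? xs (fun x => x)).getD 0

def is_rectangle (cells : List (Int × Int)) : Bool :=
  if cells.isEmpty then false
  else
    let rs := cells.map (fun p => p.1)
    let cs := cells.map (fun p => p.2)
    decide ((cells.length : Int) = (pyMaxInt rs - pyMinInt rs + 1) * (pyMaxInt cs - pyMinInt cs + 1))

-- A's inner grouping loop: colors.setdefault(v, []).append((r, c))
def colorsOf (comp : List (Int × Int × Int)) : PySem.Dict Int (List (Int × Int)) :=
  comp.foldl (fun d t => d.modify t.2.2 [] (fun l => l ++ [(t.1, t.2.1)])) PySem.Dict.empty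

-- one iteration of A's outer loop; state = (candidates, total_2color)
def stepA (st : PySem.Dict Int Int × Int) (comp : List (Int × Int × Int)) :
    PySem.Dict Int Int × Int :=
  if (colorsOf comp).size ≠ 2 then st
  else ((colorsOf comp).items.foldl
          (fun cd p => if is_rectangle p.2 then cd.modify p.1 0 (fun n => n + 1) else cd) st.1,
        st.2 + 1)

def find_anchor_color (comps : List (List (Int × Int × Int))) : Option Int :=
  let st := comps.foldl stepA (PySem.Dict.empty, 0)
  -- candidates.most_common() = stable sort of the counter items by count, descending
  match (PySem.List.sorted st.1.items (fun p => p.2) true).find? (fun p => p.2 == st.2) with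
  | some p => some p.1
  | none =>
    -- candidates.most_common(1)[0][0] if candidates else None
    if st.1.items.isEmpty then none
    else (PySem.List.sorted st.1.items (fun p => p.2) true).head?.map (fun p => p.1)

-- ===== PORT B =====
-- sorted(cells): Python's tuple-lexicographic sort is PySem.List.sorted2
def lexSorted (xs : List (Int × Int)) : List (Int × Int) :=
  PySem.List.sorted2 xs (fun p => p.1) (fun p => p.2) false

-- hand port of _matches_box (no PySem primitive): a single row-major walk over the box
-- enumeration, consuming one cell per comparison and stopping at the first mismatch; the
-- (r, c) position pointer is exact for c0 ≤ c1, which holds at the one call site (cells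
-- nonempty, so min ≤ max); recursion is structural on cells, like Python's iterator
def boxScan (cells : List (Int × Int)) (r c r1 c1 c0 : Int) : Bool :=
  if r1 < r then cells.isEmpty
  else match cells with
    | [] => false
    | p :: rest =>
      p == (r, c) && (if c < c1 then boxScan rest r (c + 1) r1 c1 c0
                      else boxScan rest (r + 1) c0 r1 c1 c0)

-- B's rectangle test: the sorted cell list is exactly the bounding-box enumeration
def rectB (v : Int) (comp : List (Int × Int × Int)) : Bool :=
  let cells := lexSorted ((comp.filter (fun t => t.2.2 == v)).map (fun t => (t.1, t.2.1)))
  let rs := cells.map (fun p => p.1)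
  let cs := cells.map (fun p => p.2)
  boxScan cells (pyMinInt rs) (pyMinInt cs) (pyMaxInt rs) (pyMaxInt cs) (pyMinInt cs)

def find_anchor_color_alt (comps : List (List (Int × Int × Int))) : Option Int :=
  let votes := comps.foldl (fun vs comp =>
    let order := PySem.List.dedup (comp.map (fun t => t.2.2))   -- dict.fromkeys(comp.values())
    if order.length ≠ 2 then vs
    else order.foldl (fun vs v => if rectB v comp then vs ++ [v] else vs) vs) []
  if votes.isEmpty then none
  else PySem.List.max? (PySem.List.dedup votes) (fun v => (votes.count v : Int))

-- ===== PRECONDITION & SPEC =====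
-- Each comp models a Python dict keyed by cell, so its (r, c) keys are distinct; Pre_ states
-- exactly that. No Python dict input is excluded — only duplicate-key item lists that exist in
-- the Lean list encoding of a dict (there A's per-color cell lists would count a cell twice).
def Pre_find_anchor_color (comps : List (List (Int × Int × Int))) : Prop :=
  ∀ comp ∈ comps, (comp.map (fun t => (t.1, t.2.1))).Nodup
instance (comps : List (List (Int × Int × Int))) : Decidable (Pre_find_anchor_color comps) := by
  unfold Pre_find_anchor_color; infer_instance

def pvWitness_find_anchor_color : (List (List (Int × Int × Int))) :=
  [[(0, 0, 1), (0, 1, 2)], [(2, 2, 5)]]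

def Spec_find_anchor_color (comps : List (List (Int × Int × Int))) (out : Option Int) : Prop := out = find_anchor_color_alt comps
instance (comps : List (List (Int × Int × Int))) (out : Option Int) : Decidable (Spec_find_anchor_color comps out) := by unfold Spec_find_anchor_color; infer_instance

-- ===== CLAIM (what is proved, stated in full; the proofs are below) =====
def Claim_equal_find_anchor_color : Prop := ∀ (comps : List (List (Int × Int × Int))), Dom_find_anchor_color comps → Pre_find_anchor_color comps → Spec_find_anchor_color comps (find_anchor_color comps)

-- ===== LEMMAS AND PROOFS =====

-- the cells of color v in a comp, in item order
def cellsFor (v : Int) (comp : List (Int × Int × Int)) : List (Int × Int) :=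
  (comp.filter (fun t => t.2.2 == v)).map (fun t => (t.1, t.2.1))

lemma colorsOf_getD (comp : List (Int × Int × Int)) (v : Int) :
    (colorsOf comp).getD v [] = cellsFor v comp := by
  have h : colorsOf comp
      = (comp.map (fun t => ((t.2.2 : Int), ((t.1 : Int), (t.2.1 : Int))))).foldl
          (fun d p => d.modify p.1 [] (fun l => l ++ [p.2])) PySem.Dict.empty := by
    rw [List.foldl_map]
    rfl
  rw [h, PySem.Dict.getD_foldl_modify_append, PySem.Dict.getD_empty, List.filter_map,
      List.map_map]
  simp [cellsFor, Function.comp_def]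

lemma keys_colorsOf (comp : List (Int × Int × Int)) :
    (colorsOf comp).keys
      = PySem.Set.update (PySem.Dict.empty : PySem.Dict Int (List (Int × Int))).keys
          (comp.map (fun t => t.2.2)) :=
  PySem.Dict.keys_foldl_modify_key comp (fun t => t.2.2) []
    (fun _ t => (fun l => l ++ [(t.1, t.2.1)])) PySem.Dict.empty

lemma nodup_keys_colorsOf (comp : List (Int × Int × Int)) : (colorsOf comp).keys.Nodup :=
  PySem.Dict.nodup_keys_foldl_modify_key comp (fun t => t.2.2) []
    (fun _ t => (fun l => l ++ [(t.1, t.2.1)])) PySem.Dict.empty PySem.Dict.nodup_keys_empty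

lemma colors_keys (comp : List (Int × Int × Int)) :
    (colorsOf comp).keys = PySem.List.dedup (comp.map (fun t => t.2.2)) := by
  rw [keys_colorsOf]; rfl

lemma size_colorsOf (comp : List (Int × Int × Int)) :
    (colorsOf comp).size = (PySem.List.dedup (comp.map (fun t => t.2.2))).length := by
  have h : (colorsOf comp).size = (colorsOf comp).keys.length := by
    simp [PySem.Dict.size, PySem.Dict.keys]
  rw [h, colors_keys]

lemma mem_keys_colorsOf {comp : List (Int × Int × Int)} {k : Int}
    (hk : k ∈ (colorsOf comp).keys) : cellsFor k comp ≠ [] := by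
  rw [keys_colorsOf] at hk
  have h1 : k ∈ comp.map (fun t => t.2.2) := by
    have h2 : PySem.Set.update ([] : List Int) (comp.map (fun t => t.2.2))
        = PySem.Set.ofList (comp.map (fun t => t.2.2)) := rfl
    rw [show (PySem.Dict.empty : PySem.Dict Int (List (Int × Int))).keys = ([] : List Int) from rfl,
      h2, PySem.Set.mem_ofList] at hk
    exact hk
  obtain ⟨t, ht, hv⟩ := List.mem_map.mp h1
  have h3 : t ∈ comp.filter (fun t => t.2.2 == k) := by
    simp [List.mem_filter, ht, hv]
  intro h
  simp only [cellsFor, List.map_eq_nil_iff] at h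
  rw [h] at h3
  exact List.not_mem_nil h3

-- ---- lexicographic order on Int pairs (the comparator inside sorted2) ----

def ltb (a b : Int × Int) : Bool :=
  decide (a.1 < b.1) || (!decide (b.1 < a.1) && decide (a.2 < b.2))

lemma ltb_iff (a b : Int × Int) :
    ltb a b = true ↔ a.1 < b.1 ∨ (a.1 = b.1 ∧ a.2 < b.2) := by
  simp only [ltb, Bool.or_eq_true, Bool.and_eq_true, Bool.not_eq_true', decide_eq_true_eq,
    decide_eq_false_iff_not]
  omega

lemma ltb_asymm {a b : Int × Int} (h : ltb a b = true) : ltb b a = false := by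
  rw [← Bool.not_eq_true, ltb_iff]; rw [ltb_iff] at h; omega

lemma ltb_trans_false {x y z : Int × Int} (h1 : ltb x y = true) (h2 : ltb z y = false) :
    ltb z x = false := by
  rw [← Bool.not_eq_true, ltb_iff]
  rw [ltb_iff] at h1
  rw [← Bool.not_eq_true, ltb_iff] at h2
  omega

lemma lexSorted_unfold (xs : List (Int × Int)) :
    lexSorted xs = xs.foldl (fun acc x => PySem.List.insertBy ltb x acc) [] := rfl

lemma pairwise_insertBy (x : Int × Int) (ys : List (Int × Int))
    (h : ys.Pairwise (fun a b => ltb b a = false)) :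
    (PySem.List.insertBy ltb x ys).Pairwise (fun a b => ltb b a = false) := by
  induction ys with
  | nil => simp [PySem.List.insertBy]
  | cons y ys ih =>
    rw [List.pairwise_cons] at h
    by_cases hxy : ltb x y = true
    · rw [show PySem.List.insertBy ltb x (y :: ys) = x :: y :: ys from by
        simp [PySem.List.insertBy, hxy]]
      refine List.pairwise_cons.mpr ⟨?_, List.pairwise_cons.mpr ⟨h.1, h.2⟩⟩
      intro z hz
      rcases List.mem_cons.mp hz with rfl | hz'
      · exact ltb_asymm hxy
      · exact ltb_trans_false hxy (h.1 z hz')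
    · have hxy' : ltb x y = false := by simpa using hxy
      rw [show PySem.List.insertBy ltb x (y :: ys) = y :: PySem.List.insertBy ltb x ys from by
        simp [PySem.List.insertBy, hxy']]
      refine List.pairwise_cons.mpr ⟨?_, ih h.2⟩
      intro z hz
      rcases (PySem.List.mem_insertBy ltb x z ys).mp hz with rfl | hz'
      · exact hxy'
      · exact h.1 z hz'

lemma lexSorted_pairwise (xs : List (Int × Int)) :
    (lexSorted xs).Pairwise (fun a b => ltb b a = false) := by
  rw [lexSorted_unfold]
  have h : ∀ acc : List (Int × Int), acc.Pairwise (fun a b => ltb b a = false) →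
      (xs.foldl (fun acc x => PySem.List.insertBy ltb x acc) acc).Pairwise
        (fun a b => ltb b a = false) := by
    induction xs with
    | nil => intro acc h; exact h
    | cons x t ih =>
      intro acc h
      exact ih _ (pairwise_insertBy x acc h)
  exact h [] List.Pairwise.nil

lemma lexSorted_perm (xs : List (Int × Int)) : (lexSorted xs).Perm xs :=
  PySem.List.sorted2_perm xs _ _ false

-- any strictly lex-increasing rearrangement of xs IS lexSorted xs
lemma lexSorted_eq_of_perm (xs ys : List (Int × Int)) (hperm : xs.Perm ys)
    (hys : ys.Pairwise (fun a b => ltb a b = true)) : lexSorted xs = ys := by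
  refine List.Perm.eq_of_pairwise ?_ (lexSorted_pairwise xs) ?_
    ((lexSorted_perm xs).trans hperm)
  · intro a b _ _ h1 h2
    rw [← Bool.not_eq_true, ltb_iff] at h1 h2
    have : a.1 = b.1 ∧ a.2 = b.2 := by omega
    exact Prod.ext this.1 this.2
  · exact hys.imp (fun {a b} h => by
      rw [ltb_iff] at h
      rw [← Bool.not_eq_true, ltb_iff]
      omega)

-- ---- the box enumeration boxScan walks, as a list ----

def boxB (r0 r1 c0 c1 : Int) : List (Int × Int) :=
  (PySem.List.pyRange r0 (r1 + 1) 1).flatMap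
    (fun r => (PySem.List.pyRange c0 (c1 + 1) 1).map (fun c => (r, c)))

lemma boxB_cons (r r1 c0 c1 : Int) (hr : r ≤ r1) :
    boxB r r1 c0 c1
      = (PySem.List.pyRange c0 (c1 + 1) 1).map (fun x => (r, x)) ++ boxB (r + 1) r1 c0 c1 := by
  rw [boxB, boxB, PySem.List.pyRange_one_cons (show r < r1 + 1 by omega), List.flatMap_cons]

lemma boxB_nil (r r1 c0 c1 : Int) (hr : r1 < r) : boxB r r1 c0 c1 = [] := by
  rw [boxB, PySem.List.pyRange_one_eq_nil (show r1 + 1 ≤ r by omega), List.flatMap_nil]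

-- boxScan is equality with the remaining box enumeration
lemma boxScan_eq (r1 c1 c0 : Int) (cells : List (Int × Int)) :
    ∀ r c, r ≤ r1 → c0 ≤ c → c ≤ c1 →
      boxScan cells r c r1 c1 c0
        = decide (cells
            = (PySem.List.pyRange c (c1 + 1) 1).map (fun x => (r, x)) ++ boxB (r + 1) r1 c0 c1) := by
  induction cells with
  | nil =>
    intro r c hr _ hc2
    unfold boxScan
    rw [if_neg (by omega), PySem.List.pyRange_one_cons (show c < c1 + 1 by omega)]
    simp
  | cons p rest ih =>
    intro r c hr hc0 hc2
    unfold boxScan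
    rw [if_neg (by omega), PySem.List.pyRange_one_cons (show c < c1 + 1 by omega),
      List.map_cons, List.cons_append]
    dsimp only
    have hbeq : (p == (r, c)) = decide (p = (r, c)) := by
      by_cases hpq : p = (r, c) <;> simp [hpq]
    by_cases hcc : c < c1
    · rw [if_pos hcc, ih r (c + 1) hr (by omega) (by omega), hbeq]
      simp
    · have hce : c = c1 := by omega
      rw [if_neg hcc,
        PySem.List.pyRange_one_eq_nil (show c1 + 1 ≤ c + 1 by omega), List.map_nil,
        List.nil_append]
      by_cases hrr : r < r1
      · rw [ih (r + 1) c0 (by omega) le_rfl (by omega),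
          ← boxB_cons (r + 1) r1 c0 c1 (by omega), hbeq]
        simp
      · rw [show boxScan rest (r + 1) c0 r1 c1 c0 = rest.isEmpty from by
            unfold boxScan; rw [if_pos (by omega)],
          boxB_nil (r + 1) r1 c0 c1 (by omega), hbeq]
        rcases rest with _ | ⟨q, t⟩ <;> simp

lemma mem_boxB (r0 r1 c0 c1 : Int) (p : Int × Int) :
    p ∈ boxB r0 r1 c0 c1 ↔ (r0 ≤ p.1 ∧ p.1 ≤ r1) ∧ (c0 ≤ p.2 ∧ p.2 ≤ c1) := by
  simp only [boxB, List.mem_flatMap, List.mem_map]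
  constructor
  · rintro ⟨r, hr, c, hc, rfl⟩
    rw [PySem.List.mem_pyRange_one] at hr hc
    exact ⟨⟨hr.1, by omega⟩, ⟨hc.1, by omega⟩⟩
  · rintro ⟨⟨h1, h2⟩, h3, h4⟩
    exact ⟨p.1, PySem.List.mem_pyRange_one.mpr ⟨h1, by omega⟩,
      p.2, PySem.List.mem_pyRange_one.mpr ⟨h3, by omega⟩, rfl⟩

lemma length_boxB (r0 r1 c0 c1 : Int) (h1 : r0 ≤ r1) (h2 : c0 ≤ c1) :
    ((boxB r0 r1 c0 c1).length : Int) = (r1 - r0 + 1) * (c1 - c0 + 1) := by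
  rw [boxB, List.length_flatMap]
  have h : ((PySem.List.pyRange r0 (r1 + 1) 1).map
      (fun r => ((PySem.List.pyRange c0 (c1 + 1) 1).map (fun c => (r, c))).length))
      = (PySem.List.pyRange r0 (r1 + 1) 1).map (fun _ => (c1 + 1 - c0).toNat) := by
    simp [PySem.List.length_pyRange_one]
  rw [h, List.map_const', List.sum_replicate, smul_eq_mul, PySem.List.length_pyRange_one]
  push_cast
  rw [Int.toNat_of_nonneg (by omega), Int.toNat_of_nonneg (by omega)]
  ring

lemma pairwise_boxB (r0 r1 c0 c1 : Int) :
    (boxB r0 r1 c0 c1).Pairwise (fun a b => ltb a b = true) := by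
  rw [boxB, List.pairwise_flatMap]
  constructor
  · intro r _
    rw [List.pairwise_map]
    refine (PySem.List.pairwise_lt_pyRange_one c0 (c1 + 1)).imp fun {a b} h => ?_
    exact (ltb_iff (r, a) (r, b)).mpr (Or.inr ⟨rfl, h⟩)
  · refine (PySem.List.pairwise_lt_pyRange_one r0 (r1 + 1)).imp fun {a b} h => ?_
    intro x hx y hy
    obtain ⟨c, _, rfl⟩ := List.mem_map.mp hx
    obtain ⟨c', _, rfl⟩ := List.mem_map.mp hy
    exact (ltb_iff _ _).mpr (Or.inl h)

-- ---- min/max of a nonempty Int list ----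

lemma pyMin_spec (l : List Int) (h : l ≠ []) : pyMinInt l ∈ l ∧ ∀ y ∈ l, pyMinInt l ≤ y := by
  cases hm : PySem.List.min? l (fun x => x) with
  | none => exact absurd ((PySem.List.min?_eq_none_iff l _).mp hm) h
  | some m =>
    have h1 : pyMinInt l = m := by simp [pyMinInt, hm]
    rw [h1]
    exact ⟨PySem.List.min?_mem hm, PySem.List.min?_isMin hm⟩

lemma pyMax_spec (l : List Int) (h : l ≠ []) : pyMaxInt l ∈ l ∧ ∀ y ∈ l, y ≤ pyMaxInt l := by
  cases hm : PySem.List.max? l (fun x => x) with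
  | none => exact absurd ((PySem.List.max?_eq_none_iff l _).mp hm) h
  | some m =>
    have h1 : pyMaxInt l = m := by simp [pyMaxInt, hm]
    rw [h1]
    exact ⟨PySem.List.max?_mem hm, PySem.List.max?_isMax hm⟩

lemma pyMin_perm {l l' : List Int} (h : l.Perm l') : pyMinInt l = pyMinInt l' := by
  rcases eq_or_ne l [] with rfl | hne
  · rw [← h.nil_eq]
  · have hne' : l' ≠ [] := fun hh => hne ((hh ▸ h).eq_nil)
    have s1 := pyMin_spec l hne
    have s2 := pyMin_spec l' hne'
    have h1 := s2.2 _ (h.mem_iff.mp s1.1)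
    have h2 := s1.2 _ (h.mem_iff.mpr s2.1)
    omega

lemma pyMax_perm {l l' : List Int} (h : l.Perm l') : pyMaxInt l = pyMaxInt l' := by
  rcases eq_or_ne l [] with rfl | hne
  · rw [← h.nil_eq]
  · have hne' : l' ≠ [] := fun hh => hne ((hh ▸ h).eq_nil)
    have s1 := pyMax_spec l hne
    have s2 := pyMax_spec l' hne'
    have h1 := s2.2 _ (h.mem_iff.mp s1.1)
    have h2 := s1.2 _ (h.mem_iff.mpr s2.1)
    omega

-- ---- the two rectangle tests agree on every color of a duplicate-free comp ----

-- rectB with its lets zeta-reduced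
lemma rectB_eq (v : Int) (comp : List (Int × Int × Int)) : rectB v comp =
    boxScan (lexSorted (cellsFor v comp))
      (pyMinInt ((lexSorted (cellsFor v comp)).map (fun p => p.1)))
      (pyMinInt ((lexSorted (cellsFor v comp)).map (fun p => p.2)))
      (pyMaxInt ((lexSorted (cellsFor v comp)).map (fun p => p.1)))
      (pyMaxInt ((lexSorted (cellsFor v comp)).map (fun p => p.2)))
      (pyMinInt ((lexSorted (cellsFor v comp)).map (fun p => p.2))) := rfl

lemma rect_eq (comp : List (Int × Int × Int))
    (hnd : (comp.map (fun t => (t.1, t.2.1))).Nodup) (k : Int)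
    (hk : k ∈ (colorsOf comp).keys) :
    is_rectangle ((colorsOf comp).getD k []) = rectB k comp := by
  have hne : cellsFor k comp ≠ [] := mem_keys_colorsOf hk
  have hndc : (cellsFor k comp).Nodup :=
    List.Nodup.sublist (List.Sublist.map _ List.filter_sublist) hnd
  set cells := cellsFor k comp with hc
  have hperm : (lexSorted cells).Perm cells := lexSorted_perm cells
  -- B's extrema over the sorted list equal A's over the raw list
  have hmr : pyMinInt ((lexSorted cells).map (fun p => p.1)) = pyMinInt (cells.map (fun p => p.1)) :=
    pyMin_perm (hperm.map _)
  have hMr : pyMaxInt ((lexSorted cells).map (fun p => p.1)) = pyMaxInt (cells.map (fun p => p.1)) :=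
    pyMax_perm (hperm.map _)
  have hmc : pyMinInt ((lexSorted cells).map (fun p => p.2)) = pyMinInt (cells.map (fun p => p.2)) :=
    pyMin_perm (hperm.map _)
  have hMc : pyMaxInt ((lexSorted cells).map (fun p => p.2)) = pyMaxInt (cells.map (fun p => p.2)) :=
    pyMax_perm (hperm.map _)
  set r0 := pyMinInt (cells.map (fun p => p.1)) with hr0
  set r1 := pyMaxInt (cells.map (fun p => p.1)) with hr1
  set c0 := pyMinInt (cells.map (fun p => p.2)) with hc0
  set c1 := pyMaxInt (cells.map (fun p => p.2)) with hc1
  have hrne : cells.map (fun p => p.1) ≠ [] := by simpa using hne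
  have hcne : cells.map (fun p => p.2) ≠ [] := by simpa using hne
  have hbnd : ∀ p ∈ cells, (r0 ≤ p.1 ∧ p.1 ≤ r1) ∧ (c0 ≤ p.2 ∧ p.2 ≤ c1) := by
    intro p hp
    exact ⟨⟨(pyMin_spec _ hrne).2 _ (List.mem_map_of_mem hp),
            (pyMax_spec _ hrne).2 _ (List.mem_map_of_mem hp)⟩,
           ⟨(pyMin_spec _ hcne).2 _ (List.mem_map_of_mem hp),
            (pyMax_spec _ hcne).2 _ (List.mem_map_of_mem hp)⟩⟩
  obtain ⟨p0, hp0⟩ := List.exists_mem_of_ne_nil cells hne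
  have h01r : r0 ≤ r1 := le_trans (hbnd p0 hp0).1.1 (hbnd p0 hp0).1.2
  have h01c : c0 ≤ c1 := le_trans (hbnd p0 hp0).2.1 (hbnd p0 hp0).2.2
  have hsub : cells ⊆ boxB r0 r1 c0 c1 := by
    intro p hp
    exact (mem_boxB r0 r1 c0 c1 p).mpr (hbnd p hp)
  have hlenbox : ((boxB r0 r1 c0 c1).length : Int) = (r1 - r0 + 1) * (c1 - c0 + 1) :=
    length_boxB r0 r1 c0 c1 h01r h01c
  -- the central equivalence
  have hiff : ((cells.length : Int) = (r1 - r0 + 1) * (c1 - c0 + 1))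
      ↔ lexSorted cells = boxB r0 r1 c0 c1 := by
    constructor
    · intro hlen
      have hl : (boxB r0 r1 c0 c1).length ≤ cells.length := by omega
      have hp : cells.Perm (boxB r0 r1 c0 c1) :=
        (hndc.subperm hsub).perm_of_length_le hl
      exact lexSorted_eq_of_perm _ _ hp (pairwise_boxB r0 r1 c0 c1)
    · intro heq
      have h1 : cells.length = (boxB r0 r1 c0 c1).length := by
        rw [← heq, (lexSorted_perm cells).length_eq]
      omega
  -- from Prop to the two Bools
  rw [colorsOf_getD, ← hc]
  have hie : cells.isEmpty = false := by simpa using hne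
  rw [is_rectangle]
  simp only [hie, Bool.false_eq_true, if_false]
  rw [rectB_eq, ← hc]
  rw [hmr, hMr, hmc, hMc, ← hr0, ← hr1, ← hc0, ← hc1]
  rw [boxScan_eq r1 c1 c0 (lexSorted cells) r0 c0 h01r le_rfl h01c,
    ← boxB_cons r0 r1 c0 c1 h01r]
  rw [Bool.eq_iff_iff]
  simp only [decide_eq_true_eq]
  exact hiff

-- ---- A's outer-loop step versus the vote stream ----

-- the votes one comp contributes
def voteOf (comp : List (Int × Int × Int)) : List Int :=
  if (PySem.List.dedup (comp.map (fun t => t.2.2))).length ≠ 2 then []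
  else (PySem.List.dedup (comp.map (fun t => t.2.2))).filter (fun v => rectB v comp)

lemma stepA_eq (comp : List (Int × Int × Int))
    (hnd : (comp.map (fun t => (t.1, t.2.1))).Nodup)
    (d : PySem.Dict Int Int) (t : Int) :
    stepA (d, t) comp
      = ((voteOf comp).foldl (fun d v => d.modify v 0 (fun n => n + 1)) d,
         t + if (PySem.List.dedup (comp.map (fun t => t.2.2))).length = 2 then 1 else 0) := by
  unfold stepA voteOf
  rw [size_colorsOf]
  by_cases hs : (PySem.List.dedup (comp.map (fun t => t.2.2))).length = 2
  · have h2 : ¬ (PySem.List.dedup (comp.map (fun t => t.2.2))).length ≠ 2 := by omega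
    rw [if_neg h2, if_neg h2, if_pos hs]
    simp only [Prod.mk.injEq]
    refine ⟨?_, by trivial⟩
    calc (colorsOf comp).items.foldl
            (fun cd p => if is_rectangle p.2 then cd.modify p.1 0 (fun n => n + 1) else cd) d
        = ((colorsOf comp).keys.map (fun k => (k, (colorsOf comp).getD k []))).foldl
            (fun cd p => if is_rectangle p.2 then cd.modify p.1 0 (fun n => n + 1) else cd) d := by
          rw [← PySem.Dict.items_eq_map_keys _ (nodup_keys_colorsOf comp) []]
      _ = (colorsOf comp).keys.foldl
            (fun cd k => if is_rectangle ((colorsOf comp).getD k []) then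
                cd.modify k 0 (fun n => n + 1) else cd) d := by
          rw [List.foldl_map]
      _ = (colorsOf comp).keys.foldl
            (fun cd k => if rectB k comp then cd.modify k 0 (fun n => n + 1) else cd) d :=
          PySem.List.foldl_congr_mem _ _ _ _ (fun cd k hk => by rw [rect_eq comp hnd k hk])
      _ = ((colorsOf comp).keys.filter (fun k => rectB k comp)).foldl
            (fun cd k => cd.modify k 0 (fun n => n + 1)) d :=
          PySem.List.foldl_if_eq_foldl_filter _ _ _ _
      _ = ((PySem.List.dedup (comp.map (fun t => t.2.2))).filter (fun v => rectB v comp)).foldl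
            (fun cd k => cd.modify k 0 (fun n => n + 1)) d := by
          rw [colors_keys]
  · rw [if_pos hs, if_pos hs, if_neg hs]
    simp

lemma foldA_fst (comps : List (List (Int × Int × Int)))
    (hnd : ∀ comp ∈ comps, (comp.map (fun t => (t.1, t.2.1))).Nodup) :
    ∀ (d : PySem.Dict Int Int) (t : Int),
      (comps.foldl stepA (d, t)).1
        = (comps.flatMap voteOf).foldl (fun d v => d.modify v 0 (fun n => n + 1)) d := by
  induction comps with
  | nil => intro d t; rfl
  | cons comp rest ih =>
    intro d t
    simp only [List.foldl_cons, List.flatMap_cons, List.foldl_append]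
    rw [stepA_eq comp (hnd comp List.mem_cons_self) d t]
    exact ih (fun c hc => hnd c (List.mem_cons_of_mem _ hc)) _ _

lemma foldA_snd (comps : List (List (Int × Int × Int))) :
    ∀ (st : PySem.Dict Int Int × Int),
      (comps.foldl stepA st).2
        = st.2 + (comps.countP
            (fun comp => (PySem.List.dedup (comp.map (fun t => t.2.2))).length == 2) : Int) := by
  induction comps with
  | nil => intro st; simp
  | cons comp rest ih =>
    intro st
    simp only [List.foldl_cons, List.countP_cons]
    rw [ih]
    unfold stepA
    rw [size_colorsOf]
    by_cases hs : (PySem.List.dedup (comp.map (fun t => t.2.2))).length = 2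
    · have h2 : ¬ (PySem.List.dedup (comp.map (fun t => t.2.2))).length ≠ 2 := by omega
      rw [if_neg h2, if_pos (by simpa using hs)]
      push_cast
      ring
    · rw [if_pos hs, if_neg (by simpa using hs)]
      simp

-- each comp contributes each color at most once, and only when it is a 2-color comp
lemma count_voteOf_le (comp : List (Int × Int × Int)) (v : Int) :
    ((voteOf comp).count v : Int)
      ≤ if (PySem.List.dedup (comp.map (fun t => t.2.2))).length == 2 then 1 else 0 := by
  unfold voteOf
  by_cases hs : (PySem.List.dedup (comp.map (fun t => t.2.2))).length = 2
  · simp only [hs, ne_eq, not_true_eq_false, if_false, beq_iff_eq, if_pos]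
    have hnd : ((PySem.List.dedup (comp.map (fun t => t.2.2))).filter
        (fun v => rectB v comp)).Nodup :=
      (PySem.Set.nodup_ofList _).filter _
    exact_mod_cast List.nodup_iff_count_le_one.mp hnd v
  · have hs' : ¬ (PySem.Set.ofList (comp.map (fun t => t.2.2))).length = 2 := hs
    simp [hs']

lemma count_votes_le (comps : List (List (Int × Int × Int))) (v : Int) :
    (((comps.flatMap voteOf).count v : Int))
      ≤ (comps.countP
          (fun comp => (PySem.List.dedup (comp.map (fun t => t.2.2))).length == 2) : Int) := by
  induction comps with
  | nil => simp
  | cons comp rest ih =>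
    simp only [List.flatMap_cons, List.count_append, List.countP_cons]
    have h := count_voteOf_le comp v
    by_cases hs : (PySem.List.dedup (comp.map (fun t => t.2.2))).length == 2
    · simp only [hs, if_pos] at h ⊢
      push_cast
      push_cast at ih h
      omega
    · simp only [hs, Bool.false_eq_true, if_false] at h ⊢
      push_cast
      push_cast at ih h
      omega

-- B's votes loop produces the flat vote stream
lemma votes_eq (comps : List (List (Int × Int × Int))) :
    comps.foldl (fun vs comp =>
        let order := PySem.List.dedup (comp.map (fun t => t.2.2))
        if order.length ≠ 2 then vs
        else order.foldl (fun vs v => if rectB v comp then vs ++ [v] else vs) vs) []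
      = comps.flatMap voteOf := by
  have h : ∀ (vs : List Int) (comp : List (Int × Int × Int)),
      (let order := PySem.List.dedup (comp.map (fun t => t.2.2))
       if order.length ≠ 2 then vs
       else order.foldl (fun vs v => if rectB v comp then vs ++ [v] else vs) vs)
        = vs ++ voteOf comp := by
    intro vs comp
    unfold voteOf
    by_cases hs : (PySem.List.dedup (comp.map (fun t => t.2.2))).length = 2
    · simp only [hs, ne_eq, not_true_eq_false, if_false]
      exact PySem.List.foldl_append_if_eq_filter (fun v => rectB v comp) _ vs
    · simp [show ¬ (PySem.Set.ofList (comp.map (fun t => t.2.2))).length = 2 from hs]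
  refine Eq.trans (PySem.List.foldl_congr_mem comps _
    (fun vs comp => vs ++ voteOf comp) [] (fun vs comp _ => h vs comp)) ?_
  exact (PySem.List.foldl_append_eq_flatMap voteOf comps []).trans (by simp)

-- ---- A's final selection collapses to a single first-max lookup ----

lemma head_sorted_rev {α : Type} (xs : List α) (key : α → Int) :
    (PySem.List.sorted xs key true).head? = PySem.List.max? xs key := by
  induction xs using List.reverseRecOn with
  | nil => rfl
  | append_singleton ys x ih =>
    simp only [PySem.List.sorted, PySem.List.max?, List.foldl_append, List.foldl_cons,
      List.foldl_nil, if_true] at *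
    cases hy : List.foldl (fun acc x => PySem.List.insertBy (fun a b => decide (key b < key a)) x acc) [] ys with
    | nil =>
      rw [hy] at ih
      simp only [PySem.List.insertBy]
      rw [← ih]
      simp
    | cons m t =>
      rw [hy] at ih
      simp only [List.head?] at ih
      rw [← ih]
      simp only [PySem.List.insertBy]
      by_cases h : key m < key x
      · rw [if_pos (by simpa using h)]
        simp [h]
      · rw [if_neg (by simpa using h)]
        simp [h]

lemma max?_map {α β : Type} (l : List α) (f : α → β) (key : β → Int) :
    PySem.List.max? (l.map f) key = (PySem.List.max? l (fun x => key (f x))).map f := by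
  simp only [PySem.List.max?, List.foldl_map]
  have h : ∀ (acc : Option α),
      l.foldl (fun acc x => match acc with
        | none => some (f x)
        | some m => if key m < key (f x) then some (f x) else some m) (acc.map f)
      = (l.foldl (fun acc x => match acc with
        | none => some x
        | some m => if key (f m) < key (f x) then some x else some m) acc).map f := by
    induction l with
    | nil => intro acc; rfl
    | cons x t iht =>
      intro acc
      simp only [List.foldl_cons]
      cases acc with
      | none => exact iht (some x)
      | some m =>
        simp only [Option.map_some]
        by_cases h : key (f m) < key (f x)
        · rw [if_pos h, if_pos h]; exact iht (some x)
        · rw [if_neg h, if_neg h]; exact iht (some m)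
  simpa using h none

lemma final_select (d : PySem.Dict Int Int) (total : Int) (hnd : d.keys.Nodup)
    (hb : ∀ p ∈ d.items, p.2 ≤ total) :
    (match (PySem.List.sorted d.items (fun p => p.2) true).find? (fun p => p.2 == total) with
     | some p => some p.1
     | none => if d.items.isEmpty then none
               else (PySem.List.sorted d.items (fun p => p.2) true).head?.map (fun p => p.1))
    = (if d.items.isEmpty then none else PySem.List.max? d.keys (fun k => d.getD k 0)) := by
  cases hmc : PySem.List.sorted d.items (fun p => p.2) true with
  | nil =>
    have hnil : d.items = [] := (PySem.List.sorted_eq_nil_iff _ _ _).mp hmc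
    simp [hnil]
  | cons m t =>
    have hne : d.items ≠ [] := by
      intro h
      rw [(PySem.List.sorted_eq_nil_iff d.items (fun p => p.2) true).mpr h] at hmc
      exact List.cons_ne_nil m t hmc.symm
    have hie : d.items.isEmpty = false := by simpa using hne
    have hmax : PySem.List.max? d.items (fun p => p.2) = some m := by
      rw [← head_sorted_rev, hmc]; rfl
    have hitems : d.items = d.keys.map (fun k => (k, d.getD k 0)) :=
      PySem.Dict.items_eq_map_keys d hnd 0
    have hkeysmax : (PySem.List.max? d.keys (fun k => d.getD k 0)).map
        (fun k => ((k : Int), d.getD k 0)) = some m := by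
      rw [← max?_map d.keys (fun k => ((k : Int), d.getD k 0)) (fun p => p.2), ← hitems]
      exact hmax
    obtain ⟨km, hkm, hfm⟩ : ∃ km, PySem.List.max? d.keys (fun k => d.getD k 0) = some km
        ∧ ((km : Int), d.getD km 0) = m := by
      cases hx : PySem.List.max? d.keys (fun k => d.getD k 0) with
      | none => rw [hx] at hkeysmax; exact absurd hkeysmax (by simp)
      | some km => rw [hx] at hkeysmax; exact ⟨km, rfl, by simpa using hkeysmax⟩
    have hkm1 : m.1 = km := by rw [← hfm]
    have hm_mem : m ∈ d.items := (PySem.List.mem_sorted _ _ _ m).mp (hmc ▸ List.mem_cons_self)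
    have hmle : m.2 ≤ total := hb m hm_mem
    by_cases hmt : m.2 = total
    · have hfind : List.find? (fun p => p.2 == total) (m :: t) = some m := by
        rw [List.find?_cons_of_pos (by simpa using hmt)]
      rw [hfind]
      simp only [hie, Bool.false_eq_true, if_false]
      rw [hkm, hkm1]
    · have hnone : List.find? (fun p => p.2 == total) (m :: t) = none := by
        rw [List.find?_eq_none]
        intro p hp
        have hpmem : p ∈ d.items := (PySem.List.mem_sorted _ _ _ p).mp (hmc ▸ hp)
        have h1 : p.2 ≤ m.2 := PySem.List.key_head_sorted_rev_ge d.items (fun p => p.2) hmc p hpmem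
        simp only [beq_iff_eq]
        intro hc
        rw [hc] at h1
        omega
      rw [hnone]
      simp only [hie, Bool.false_eq_true, if_false, List.head?_cons, Option.map_some]
      rw [hkm, hkm1]

-- ===== VERDICT (by name: the statement is the Claim_ definition above) =====
theorem find_anchor_color_spec : Claim_equal_find_anchor_color := by
  intro comps _ hpre
  unfold Spec_find_anchor_color find_anchor_color find_anchor_color_alt
  dsimp only
  rw [votes_eq]
  set votes := comps.flatMap voteOf with hv
  -- A's accumulated state
  have hfst := foldA_fst comps hpre PySem.Dict.empty 0
  have hsnd := foldA_snd comps (PySem.Dict.empty, 0)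
  have hcounter : (comps.foldl stepA (PySem.Dict.empty, 0)).1 = PySem.Dict.counter votes := by
    rw [hfst]; rfl
  have htotal : (comps.foldl stepA (PySem.Dict.empty, 0)).2
      = (comps.countP (fun comp =>
          (PySem.List.dedup (comp.map (fun t => t.2.2))).length == 2) : Int) := by
    rw [hsnd]; ring
  rw [hcounter, htotal]
  set total := (comps.countP (fun comp =>
      (PySem.List.dedup (comp.map (fun t => t.2.2))).length == 2) : Int) with ht
  have hb : ∀ p ∈ (PySem.Dict.counter votes).items, p.2 ≤ total := by
    intro p hp
    rw [PySem.Dict.items_counter] at hp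
    obtain ⟨k, _, rfl⟩ := List.mem_map.mp hp
    exact count_votes_le comps k
  have hkeys : (PySem.Dict.counter votes).keys = PySem.List.dedup votes := by
    rw [PySem.Dict.keys_counter]; rfl
  have hfun : (fun k => (PySem.Dict.counter votes).getD k 0)
      = (fun v => (votes.count v : Int)) := funext (fun v => PySem.Dict.getD_counter votes v)
  have hempty : (PySem.Dict.counter votes).items.isEmpty = votes.isEmpty := by
    cases votes with
    | nil => rfl
    | cons x t =>
      simp [PySem.Dict.items_counter, PySem.Set.ofList_cons]
  rw [← hkeys, ← hfun, ← hempty]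
  exact final_select (PySem.Dict.counter votes) total
    (PySem.Dict.nodup_keys_counter votes) hb
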